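-- pv_equiv track=rewrite | github.com/augustinepicquet/stage_l3 | pour_sampling.py | converti_en_tableau_de_tableaux
-- ===== SOURCE A (Python) =====
-- def converti_en_tableau_de_tableaux(dico, nb_elts_a_suppr):
--
--
--     res = [] #contient les valeurs à mettre dans l'histo
--     res_bis = [] #contient les découpages dans le même ordre
--     tab_taille_coupe = [] #contient les tailles des coupes à mettre en abscisse
--     clefs = sorted(dico.keys())[:len(dico.keys())-nb_elts_a_suppr]
--     petit_tableau = [0]*len(clefs)
--     petit_tableau_bis = [""] * len(clefs)
--     for j in range(len(clefs)):
--         elt = clefs[j]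
--         tab_taille_coupe.append(elt)
--         decoup_de_coupe_fixee_et_occurrence_associee = dico[elt]
--         if len(decoup_de_coupe_fixee_et_occurrence_associee) > len(res):
--             while (len(decoup_de_coupe_fixee_et_occurrence_associee)) > len(res):
--                 res.append([0]*len(clefs))
--                 res_bis.append([""]*len(clefs))
--         for i in range(len(decoup_de_coupe_fixee_et_occurrence_associee)):
--             res[i][j] = decoup_de_coupe_fixee_et_occurrence_associee[i][1]
--             res_bis[i][j] = decoup_de_coupe_fixee_et_occurrence_associee[i][0]
--
--     return res, res_bis, tab_taille_coupe
-- ===== SOURCE B (Python) =====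
-- def converti_en_tableau_de_tableaux(dico, nb_elts_a_suppr):
--     clefs = sorted(dico.keys())[:len(dico.keys()) - nb_elts_a_suppr]
--     nrows = max((len(dico[k]) for k in clefs), default=0)
--     res = [[dico[k][i][1] if i < len(dico[k]) else 0 for k in clefs]
--            for i in range(nrows)]
--     res_bis = [[dico[k][i][0] if i < len(dico[k]) else "" for k in clefs]
--                for i in range(nrows)]
--     return res, res_bis, list(clefs)
-- ===== Notes on version B (the rewrite author's own statement) =====
-- stated objective: simpler
-- what changed: B computes the truncated sorted key list and the row count (max column height, default 0) once and builds each matrix directly with row-wise comprehensions, instead of A's grow-on-demand while-loop that appends padding rows and mutates matrix cells column by column.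
import Mathlib
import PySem

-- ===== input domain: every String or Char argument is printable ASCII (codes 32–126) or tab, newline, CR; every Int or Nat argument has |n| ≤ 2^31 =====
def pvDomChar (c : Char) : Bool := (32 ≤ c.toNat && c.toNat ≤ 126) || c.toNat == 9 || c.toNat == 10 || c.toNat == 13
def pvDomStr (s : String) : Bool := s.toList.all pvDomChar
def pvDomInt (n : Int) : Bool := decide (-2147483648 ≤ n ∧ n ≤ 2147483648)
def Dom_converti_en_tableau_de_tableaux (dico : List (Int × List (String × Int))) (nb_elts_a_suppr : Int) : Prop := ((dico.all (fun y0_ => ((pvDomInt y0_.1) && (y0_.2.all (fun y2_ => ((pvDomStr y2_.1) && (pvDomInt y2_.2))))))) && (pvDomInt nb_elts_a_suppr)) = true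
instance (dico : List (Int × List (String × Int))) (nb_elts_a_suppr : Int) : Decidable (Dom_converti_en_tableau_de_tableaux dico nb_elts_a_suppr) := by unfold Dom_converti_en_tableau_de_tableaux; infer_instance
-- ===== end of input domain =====

-- B builds the matrices row-by-row with comprehensions after computing the row
-- count once, instead of A's grow-on-demand mutation of column slots; objective: simpler.

-- ===== PORT A =====
-- the 'while len(...) > len(res)' loop appending padding rows
def pvGrowA (L m : Nat) (res : List (List Int)) (resb : List (List String)) :
    List (List Int) × List (List String) :=
  if L > res.length then
    pvGrowA L m (res ++ [List.replicate m 0]) (resb ++ [List.replicate m ""])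
  else (res, resb)
termination_by L - res.length

def converti_en_tableau_de_tableaux (dico : List (Int × List (String × Int))) (nb_elts_a_suppr : Int) : List (List Int) × List (List String) × List Int :=
  let d := PySem.Dict.ofList dico
  let keysl := PySem.Dict.keys d
  let clefs := PySem.List.slice (PySem.List.sorted keysl (fun x => x) false) none
      (some ((keysl.length : Int) - nb_elts_a_suppr))
  let st := (PySem.List.pyRange 0 (clefs.length : Int) 1).foldl
    (fun (st : List (List Int) × List (List String) × List Int) j =>
      let elt := PySem.List.pyGetD clefs j 0
      let tab := st.2.2 ++ [elt]
      let vals := PySem.Dict.getD d elt []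
      let grown :=
        if vals.length > st.1.length then pvGrowA vals.length clefs.length st.1 st.2.1
        else (st.1, st.2.1)
      let filled := (PySem.List.pyRange 0 (vals.length : Int) 1).foldl
        (fun (p : List (List Int) × List (List String)) i =>
          let v := PySem.List.pyGetD vals i ("", 0)
          (PySem.List.pySetD p.1 i (PySem.List.pySetD (PySem.List.pyGetD p.1 i []) j v.2),
           PySem.List.pySetD p.2 i (PySem.List.pySetD (PySem.List.pyGetD p.2 i []) j v.1)))
        grown
      (filled.1, filled.2, tab))
    ([], [], [])
  (st.1, st.2.1, st.2.2)

-- ===== PORT B =====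
def converti_en_tableau_de_tableaux_alt (dico : List (Int × List (String × Int))) (nb_elts_a_suppr : Int) : List (List Int) × List (List String) × List Int :=
  let d := PySem.Dict.ofList dico
  let keysl := PySem.Dict.keys d
  let clefs := PySem.List.slice (PySem.List.sorted keysl (fun x => x) false) none
      (some ((keysl.length : Int) - nb_elts_a_suppr))
  let nrows := PySem.List.maxD (clefs.map (fun k => (PySem.Dict.getD d k []).length)) (fun x => x) 0
  let res := (List.range nrows).map (fun i =>
    clefs.map (fun k =>
      let vals := PySem.Dict.getD d k []
      if i < vals.length then (vals.getD i ("", 0)).2 else 0))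
  let res_bis := (List.range nrows).map (fun i =>
    clefs.map (fun k =>
      let vals := PySem.Dict.getD d k []
      if i < vals.length then (vals.getD i ("", 0)).1 else ""))
  (res, res_bis, clefs)

-- ===== PRECONDITION & SPEC =====
def Spec_converti_en_tableau_de_tableaux (dico : List (Int × List (String × Int))) (nb_elts_a_suppr : Int) (out : List (List Int) × List (List String) × List Int) : Prop := out = converti_en_tableau_de_tableaux_alt dico nb_elts_a_suppr
instance (dico : List (Int × List (String × Int))) (nb_elts_a_suppr : Int) (out : List (List Int) × List (List String) × List Int) : Decidable (Spec_converti_en_tableau_de_tableaux dico nb_elts_a_suppr out) := by unfold Spec_converti_en_tableau_de_tableaux; infer_instance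

-- ===== CLAIM (what is proved, stated in full; the proofs are below) =====
def Claim_equal_converti_en_tableau_de_tableaux : Prop := ∀ (dico : List (Int × List (String × Int))) (nb_elts_a_suppr : Int), Dom_converti_en_tableau_de_tableaux dico nb_elts_a_suppr → Spec_converti_en_tableau_de_tableaux dico nb_elts_a_suppr (converti_en_tableau_de_tableaux dico nb_elts_a_suppr)

-- ===== LEMMAS AND PROOFS =====

-- entry of the value (resp. string) matrix at row i, column j
def pvEntV (F : Int → List (String × Int)) (ks : List Int) (i j : Nat) : Int :=
  if i < (F (ks.getD j 0)).length then ((F (ks.getD j 0)).getD i ("", 0)).2 else 0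
def pvEntW (F : Int → List (String × Int)) (ks : List Int) (i j : Nat) : String :=
  if i < (F (ks.getD j 0)).length then ((F (ks.getD j 0)).getD i ("", 0)).1 else ""
-- row i after the first t columns have been processed
def pvRowV (F : Int → List (String × Int)) (ks : List Int) (t i : Nat) : List Int :=
  (List.range ks.length).map (fun j => if j < t then pvEntV F ks i j else 0)
def pvRowW (F : Int → List (String × Int)) (ks : List Int) (t i : Nat) : List String :=
  (List.range ks.length).map (fun j => if j < t then pvEntW F ks i j else "")
-- number of rows demanded by the keys seen so far
def pvMaxL (F : Int → List (String × Int)) (ks : List Int) : Nat :=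
  (ks.map (fun k => (F k).length)).foldl max 0
-- the whole loop state after t iterations
def pvSt (F : Int → List (String × Int)) (ks : List Int) (t : Nat) :
    List (List Int) × List (List String) × List Int :=
  ((List.range (pvMaxL F (ks.take t))).map (pvRowV F ks t),
   (List.range (pvMaxL F (ks.take t))).map (pvRowW F ks t),
   ks.take t)

lemma pv_len_le_max (F : Int → List (String × Int)) (ks : List Int) (k : Int) (hk : k ∈ ks) :
    (F k).length ≤ pvMaxL F ks := by
  unfold pvMaxL
  rw [List.foldl_map]
  exact (PySem.List.le_foldl_max_nat ks (fun k => (F k).length) 0).2 k hk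

lemma pv_set_map_range {α : Type} (g : Nat → α) (N n : Nat) (hn : n < N) (v : α) :
    ((List.range N).map g).set n v = (List.range N).map (fun i => if i = n then v else g i) := by
  apply List.ext_getElem
  · simp
  · intro i h1 h2
    simp only [List.length_set, List.length_map, List.length_range] at h1
    simp only [List.getElem_set, List.getElem_map, List.getElem_range]
    by_cases h : i = n
    · subst h; simp
    · simp [h, Ne.symm h]

lemma pv_getD_map_range {α : Type} (g : Nat → α) (N n : Nat) (hn : n < N) (d : α) :
    ((List.range N).map g).getD n d = g n := by
  have h2 : n < ((List.range N).map g).length := by simp [hn]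
  rw [List.getD_eq_getElem _ _ h2, List.getElem_map, List.getElem_range]

lemma pv_map_getD_range {α β : Type} [Inhabited α] (ks : List α) (G : α → β) (d : α) :
    (List.range ks.length).map (fun j => G (ks.getD j d)) = ks.map G := by
  apply List.ext_getElem
  · simp
  · intro i h1 h2
    simp only [List.getElem_map, List.getElem_range]
    rw [List.getD_eq_getElem _ _ (by simpa using h2)]

lemma pv_map_range_append_replicate {α : Type} (g : Nat → α) (c : α) (N K : Nat)
    (h : ∀ i, N ≤ i → g i = c) :
    (List.range N).map g ++ List.replicate K c = (List.range (N + K)).map g := by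
  rw [List.range_add, List.map_append, List.map_map]
  congr 1
  symm
  refine List.eq_replicate_iff.mpr ⟨by simp, ?_⟩
  intro b hb
  simp only [List.mem_map, List.mem_range, Function.comp] at hb
  obtain ⟨j, _, rfl⟩ := hb
  exact h _ (Nat.le_add_right _ _)

lemma pvGrowA_spec (L m : Nat) : ∀ (k : Nat) (res : List (List Int)) (resb : List (List String)),
    L - res.length = k → resb.length = res.length →
    pvGrowA L m res resb =
      (res ++ List.replicate (L - res.length) (List.replicate m 0),
       resb ++ List.replicate (L - res.length) (List.replicate m "")) := by
  intro k
  induction k with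
  | zero =>
    intro res resb hk hlen
    rw [pvGrowA, if_neg (by omega)]
    simp [hk]
  | succ k ih =>
    intro res resb hk hlen
    rw [pvGrowA, if_pos (by omega)]
    rw [ih (res ++ [List.replicate m 0]) (resb ++ [List.replicate m ""]) (by simp; omega) (by simp [hlen])]
    simp only [List.length_append, List.length_cons, List.length_nil, List.append_assoc,
      List.singleton_append, Nat.zero_add]
    have e : L - res.length = (L - (res.length + 1)) + 1 := by omega
    rw [e, List.replicate_succ, List.replicate_succ]

lemma pvRow_zero (F : Int → List (String × Int)) (ks : List Int) (t : Nat) (ht : t ≤ ks.length)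
    (i : Nat) (hi : pvMaxL F (ks.take t) ≤ i) :
    pvRowV F ks t i = List.replicate ks.length 0 ∧ pvRowW F ks t i = List.replicate ks.length "" := by
  have key : ∀ j, j < t → ¬ i < (F (ks.getD j 0)).length := by
    intro j hj
    have hjl : j < ks.length := lt_of_lt_of_le hj ht
    have hmem : ks.getD j 0 ∈ ks.take t := by
      rw [List.getD_eq_getElem _ _ hjl]
      have hjt : j < (ks.take t).length := by simp; omega
      have : ks[j] = (ks.take t)[j] := (List.getElem_take ..).symm
      rw [this]
      exact List.getElem_mem hjt
    have := pv_len_le_max F (ks.take t) _ hmem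
    omega
  constructor
  · rw [List.eq_replicate_iff]
    refine ⟨by simp [pvRowV], ?_⟩
    intro b hb
    simp only [pvRowV, List.mem_map, List.mem_range] at hb
    obtain ⟨j, hj, rfl⟩ := hb
    split_ifs with h
    · simp only [pvEntV]
      exact if_neg (key j h)
    · rfl
  · rw [List.eq_replicate_iff]
    refine ⟨by simp [pvRowW], ?_⟩
    intro b hb
    simp only [pvRowW, List.mem_map, List.mem_range] at hb
    obtain ⟨j, hj, rfl⟩ := hb
    split_ifs with h
    · simp only [pvEntW]
      exact if_neg (key j h)
    · rfl

lemma pvMax_take_succ (F : Int → List (String × Int)) (ks : List Int) (t : Nat) (ht : t < ks.length) :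
    pvMaxL F (ks.take (t + 1)) = max (pvMaxL F (ks.take t)) (F (ks.getD t 0)).length := by
  unfold pvMaxL
  rw [List.take_add_one, List.getElem?_eq_getElem ht]
  simp only [Option.toList_some, List.map_append, List.foldl_append, List.map_cons, List.map_nil,
    List.foldl_cons, List.foldl_nil]
  rw [List.getD_eq_getElem _ _ ht]

lemma pvFill (vals : List (String × Int)) (t N : Nat) (g : Nat → List Int) (h : Nat → List String)
    (hL : vals.length ≤ N) : ∀ n, n ≤ vals.length →
    (PySem.List.pyRange 0 (n : Int) 1).foldl
      (fun (p : List (List Int) × List (List String)) i =>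
        let v := PySem.List.pyGetD vals i ("", 0)
        (PySem.List.pySetD p.1 i (PySem.List.pySetD (PySem.List.pyGetD p.1 i []) (t : Int) v.2),
         PySem.List.pySetD p.2 i (PySem.List.pySetD (PySem.List.pyGetD p.2 i []) (t : Int) v.1)))
      ((List.range N).map g, (List.range N).map h)
    = ((List.range N).map (fun i => if i < n then (g i).set t (vals.getD i ("", 0)).2 else g i),
       (List.range N).map (fun i => if i < n then (h i).set t (vals.getD i ("", 0)).1 else h i)) := by
  intro n
  induction n with
  | zero =>
    intro _
    rw [PySem.List.pyRange_one_eq_nil (by omega)]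
    simp
  | succ n ih =>
    intro hn
    have hnN : n < N := by omega
    have : ((n + 1 : Nat) : Int) = (n : Int) + 1 := by push_cast; ring
    rw [this, PySem.List.pyRange_one_succ_right (by omega), List.foldl_append, ih (by omega)]
    simp only [List.foldl_cons, List.foldl_nil]
    simp only [PySem.List.pyGetD_natCast, PySem.List.pySetD_natCast]
    rw [pv_getD_map_range _ _ _ hnN, pv_getD_map_range _ _ _ hnN]
    rw [pv_set_map_range _ _ _ hnN, pv_set_map_range _ _ _ hnN]
    refine congrArg₂ Prod.mk ?_ ?_
    · congr 1
      funext i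
      by_cases hin : i = n
      · subst hin; simp
      · have hlt : i < n + 1 ↔ i < n := by omega
        simp [hin, hlt]
    · congr 1
      funext i
      by_cases hin : i = n
      · subst hin; simp
      · have hlt : i < n + 1 ↔ i < n := by omega
        simp [hin, hlt]

lemma pvRowV_step (F : Int → List (String × Int)) (ks : List Int) (t : Nat) (ht : t < ks.length)
    (i : Nat) :
    (if i < (F (ks.getD t 0)).length then
        (pvRowV F ks t i).set t ((F (ks.getD t 0)).getD i ("", 0)).2
      else pvRowV F ks t i) = pvRowV F ks (t + 1) i := by
  unfold pvRowV
  split_ifs with hiL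
  · rw [pv_set_map_range _ _ _ ht]
    congr 1
    funext j
    by_cases hjt : j = t
    · rw [hjt]
      rw [if_pos rfl, if_pos (Nat.lt_succ_self t)]
      simp only [pvEntV]
      rw [if_pos hiL]
    · have hlt : j < t + 1 ↔ j < t := by omega
      rw [if_neg hjt]
      simp [hlt]
  · congr 1
    funext j
    by_cases hjt : j = t
    · rw [hjt]
      rw [if_neg (Nat.lt_irrefl t), if_pos (Nat.lt_succ_self t)]
      simp only [pvEntV]
      rw [if_neg hiL]
    · have hlt : j < t + 1 ↔ j < t := by omega
      simp [hlt]

lemma pvRowW_step (F : Int → List (String × Int)) (ks : List Int) (t : Nat) (ht : t < ks.length)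
    (i : Nat) :
    (if i < (F (ks.getD t 0)).length then
        (pvRowW F ks t i).set t ((F (ks.getD t 0)).getD i ("", 0)).1
      else pvRowW F ks t i) = pvRowW F ks (t + 1) i := by
  unfold pvRowW
  split_ifs with hiL
  · rw [pv_set_map_range _ _ _ ht]
    congr 1
    funext j
    by_cases hjt : j = t
    · rw [hjt]
      rw [if_pos rfl, if_pos (Nat.lt_succ_self t)]
      simp only [pvEntW]
      rw [if_pos hiL]
    · have hlt : j < t + 1 ↔ j < t := by omega
      rw [if_neg hjt]
      simp [hlt]
  · congr 1
    funext j
    by_cases hjt : j = t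
    · rw [hjt]
      rw [if_neg (Nat.lt_irrefl t), if_pos (Nat.lt_succ_self t)]
      simp only [pvEntW]
      rw [if_neg hiL]
    · have hlt : j < t + 1 ↔ j < t := by omega
      simp [hlt]

lemma pvInv (d : PySem.Dict Int (List (String × Int))) (ks : List Int) :
    ∀ t : Nat, t ≤ ks.length →
    (PySem.List.pyRange 0 (t : Int) 1).foldl
      (fun (st : List (List Int) × List (List String) × List Int) j =>
        let elt := PySem.List.pyGetD ks j 0
        let tab := st.2.2 ++ [elt]
        let vals := PySem.Dict.getD d elt []
        let grown :=
          if vals.length > st.1.length then pvGrowA vals.length ks.length st.1 st.2.1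
          else (st.1, st.2.1)
        let filled := (PySem.List.pyRange 0 (vals.length : Int) 1).foldl
          (fun (p : List (List Int) × List (List String)) i =>
            let v := PySem.List.pyGetD vals i ("", 0)
            (PySem.List.pySetD p.1 i (PySem.List.pySetD (PySem.List.pyGetD p.1 i []) j v.2),
             PySem.List.pySetD p.2 i (PySem.List.pySetD (PySem.List.pyGetD p.2 i []) j v.1)))
          grown
        (filled.1, filled.2, tab))
      ([], [], []) = pvSt (fun k => PySem.Dict.getD d k []) ks t := by
  intro t
  induction t with
  | zero =>
    intro _
    rw [PySem.List.pyRange_one_eq_nil (by omega)]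
    simp [pvSt, pvMaxL]
  | succ t ih =>
    intro ht
    have htl : t < ks.length := by omega
    set F : Int → List (String × Int) := fun k => PySem.Dict.getD d k [] with hF
    have : ((t + 1 : Nat) : Int) = (t : Int) + 1 := by push_cast; ring
    rw [this, PySem.List.pyRange_one_succ_right (by omega), List.foldl_append, ih (by omega)]
    simp only [List.foldl_cons, List.foldl_nil]
    simp only [PySem.List.pyGetD_natCast]
    -- notation
    set Mt := pvMaxL F (ks.take t) with hMt
    set L := (F (ks.getD t 0)).length with hL
    have hstate1 : (pvSt F ks t).1 = (List.range Mt).map (pvRowV F ks t) := rfl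
    have hstate21 : (pvSt F ks t).2.1 = (List.range Mt).map (pvRowW F ks t) := rfl
    have hstate22 : (pvSt F ks t).2.2 = ks.take t := rfl
    rw [hstate1, hstate21, hstate22]
    -- the grow phase yields range (max Mt L)
    have hgrow :
        (if L > ((List.range Mt).map (pvRowV F ks t)).length
          then pvGrowA L ks.length ((List.range Mt).map (pvRowV F ks t))
                 ((List.range Mt).map (pvRowW F ks t))
          else ((List.range Mt).map (pvRowV F ks t), (List.range Mt).map (pvRowW F ks t)))
        = ((List.range (max Mt L)).map (pvRowV F ks t),
           (List.range (max Mt L)).map (pvRowW F ks t)) := by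
      have hlen : ((List.range Mt).map (pvRowV F ks t)).length = Mt := by simp
      split_ifs with hgt
      · rw [hlen] at hgt
        rw [pvGrowA_spec L ks.length (L - ((List.range Mt).map (pvRowV F ks t)).length) _ _ rfl
          (by simp)]
        rw [hlen]
        rw [pv_map_range_append_replicate _ _ _ _
          (fun i hi => (pvRow_zero F ks t (by omega) i hi).1)]
        rw [pv_map_range_append_replicate _ _ _ _
          (fun i hi => (pvRow_zero F ks t (by omega) i hi).2)]
        have : Mt + (L - Mt) = max Mt L := by omega
        rw [this]
      · rw [hlen] at hgt
        have : max Mt L = Mt := by omega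
        rw [this]
    rw [hgrow]
    -- the fill phase
    rw [pvFill (F (ks.getD t 0)) t (max Mt L) _ _ (by omega) L le_rfl]
    -- rows match the t+1 row shape
    have hmax : pvMaxL F (ks.take (t + 1)) = max Mt L := pvMax_take_succ F ks t htl
    have htake : ks.take t ++ [ks.getD t 0] = ks.take (t + 1) := by
      rw [List.take_add_one, List.getElem?_eq_getElem htl, List.getD_eq_getElem _ _ htl]
      simp
    unfold pvSt
    rw [hmax, htake]
    dsimp only
    refine congrArg₂ _ ?_ (congrArg₂ _ ?_ rfl)
    · apply List.map_congr_left
      intro i _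
      simpa [← hL] using pvRowV_step F ks t htl i
    · apply List.map_congr_left
      intro i _
      simpa [← hL] using pvRowW_step F ks t htl i

lemma pvMaxD_eq_foldl (xs : List Nat) :
    PySem.List.maxD xs (fun x => x) 0 = xs.foldl max 0 := by
  cases xs with
  | nil => rw [PySem.List.maxD_nil, List.foldl_nil]
  | cons x t => rw [PySem.List.maxD_id_cons, List.foldl_cons, Nat.zero_max]

lemma pvSt_full (F : Int → List (String × Int)) (ks : List Int) :
    pvSt F ks ks.length =
      ((List.range (pvMaxL F ks)).map (fun i =>
          ks.map (fun k => if i < (F k).length then ((F k).getD i ("", 0)).2 else 0)),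
       (List.range (pvMaxL F ks)).map (fun i =>
          ks.map (fun k => if i < (F k).length then ((F k).getD i ("", 0)).1 else "")),
       ks) := by
  unfold pvSt
  rw [List.take_length]
  refine congrArg₂ _ ?_ (congrArg₂ _ ?_ rfl)
  · congr 1
    funext i
    unfold pvRowV
    rw [← pv_map_getD_range ks (fun k => if i < (F k).length then ((F k).getD i ("", 0)).2 else 0) 0]
    apply List.map_congr_left
    intro j hj
    simp only [List.mem_range] at hj
    simp [pvEntV, hj]
  · congr 1
    funext i
    unfold pvRowW
    rw [← pv_map_getD_range ks (fun k => if i < (F k).length then ((F k).getD i ("", 0)).1 else "") 0]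
    apply List.map_congr_left
    intro j hj
    simp only [List.mem_range] at hj
    simp [pvEntW, hj]

-- ===== VERDICT (by name: the statement is the Claim_ definition above) =====
theorem converti_en_tableau_de_tableaux_spec : Claim_equal_converti_en_tableau_de_tableaux := by
  intro dico nb _
  unfold Spec_converti_en_tableau_de_tableaux
  unfold converti_en_tableau_de_tableaux converti_en_tableau_de_tableaux_alt
  dsimp only
  set d := PySem.Dict.ofList dico with hd
  set clefs := PySem.List.slice (PySem.List.sorted (PySem.Dict.keys d) (fun x => x) false) none
      (some (((PySem.Dict.keys d).length : Int) - nb)) with hclefs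
  rw [pvInv d clefs clefs.length le_rfl]
  rw [pvSt_full (fun k => PySem.Dict.getD d k []) clefs]
  rw [pvMaxD_eq_foldl]
  have : (clefs.map (fun k => (PySem.Dict.getD d k []).length)).foldl max 0
      = pvMaxL (fun k => PySem.Dict.getD d k []) clefs := rfl
  rw [this]
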